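-- pv_equiv track=rewrite | github.com/jackdorner/Canadian-Tire-Fox-Sports | app/views.py | _get_stat_value
-- ===== SOURCE A (Python) =====
-- def _get_stat_value(stats_list, names, default='-'):
--     if isinstance(names, str):
--         names = [names]
--
--     for n in names:
--         for stat in stats_list:
--             if stat.get("name") == n:
--                 val = stat.get("displayValue")
--                 if val not in (None, ""):
--                     return val
--                 val = stat.get("value")
--                 if val not in (None, ""):
--                     return val
--     return default
-- ===== SOURCE B (Python) =====
-- def _get_stat_value(stats_list, names, default='-'):
--     if isinstance(names, str):
--         names = [names]
--
--     index = {}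
--     for stat in stats_list:
--         key = stat.get("name")
--         val = stat.get("displayValue")
--         if val in (None, ""):
--             val = stat.get("value")
--         if val not in (None, "") and key not in index:
--             index[key] = val
--
--     for n in names:
--         if n in index:
--             return index[n]
--     return default
-- ===== Notes on version B (the rewrite author's own statement) =====
-- stated objective: faster
-- what changed: Replaces the nested names-by-stats rescan with a single pass that builds a name-to-first-valid-value index (displayValue preferred over value, first valid stat per name kept), then a plain lookup loop over names.
import Mathlib
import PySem

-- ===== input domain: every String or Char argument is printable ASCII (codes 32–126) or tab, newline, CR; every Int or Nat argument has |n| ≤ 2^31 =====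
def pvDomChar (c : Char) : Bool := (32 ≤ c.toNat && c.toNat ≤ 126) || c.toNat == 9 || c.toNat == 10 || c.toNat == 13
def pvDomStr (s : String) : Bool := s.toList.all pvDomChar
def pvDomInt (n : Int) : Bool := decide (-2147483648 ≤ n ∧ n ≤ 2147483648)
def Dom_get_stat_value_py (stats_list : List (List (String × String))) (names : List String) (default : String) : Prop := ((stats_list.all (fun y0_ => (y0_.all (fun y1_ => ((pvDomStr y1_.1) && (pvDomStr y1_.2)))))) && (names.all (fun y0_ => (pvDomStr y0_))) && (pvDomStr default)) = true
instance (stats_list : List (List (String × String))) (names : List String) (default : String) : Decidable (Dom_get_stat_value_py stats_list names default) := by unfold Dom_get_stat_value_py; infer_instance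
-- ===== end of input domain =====

-- B replaces A's nested names-by-stats rescan with a single pass building a name->first-valid-value index, then lookups over names (idiomatic build-index-then-lookup).


-- ===== PORT A =====
-- inner 'for stat in stats_list' loop of A, for one name n; 'some v' = 'return v', 'none' = loop fell through
def pvInnerA (n : String) : List (List (String × String)) → Option String
  | [] => none
  | stat :: rest =>
    if (PySem.Dict.mk stat).get? "name" = some n then
      match (PySem.Dict.mk stat).get? "displayValue" with
      | some v =>
        if v ≠ "" then some v
        else
          match (PySem.Dict.mk stat).get? "value" with
          | some w => if w ≠ "" then some w else pvInnerA n rest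
          | none => pvInnerA n rest
      | none =>
        match (PySem.Dict.mk stat).get? "value" with
        | some w => if w ≠ "" then some w else pvInnerA n rest
        | none => pvInnerA n rest
    else pvInnerA n rest

-- outer 'for n in names' loop of A
def pvOuterA (stats_list : List (List (String × String))) (default : String) : List String → String
  | [] => default
  | n :: rest =>
    match pvInnerA n stats_list with
    | some v => v
    | none => pvOuterA stats_list default rest

def get_stat_value_py (stats_list : List (List (String × String))) (names : List String) (default : String) : String :=
  pvOuterA stats_list default names

-- ===== PORT B =====
-- 'val = stat.get("displayValue"); if val in (None, ""): val = stat.get("value")'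
def pvStatVal (stat : List (String × String)) : Option String :=
  let dv := (PySem.Dict.mk stat).get? "displayValue"
  if dv = none ∨ dv = some "" then (PySem.Dict.mk stat).get? "value" else dv

-- one iteration of B's index-building loop
def pvStepB (d : PySem.Dict (Option String) String) (stat : List (String × String)) : PySem.Dict (Option String) String :=
  match pvStatVal stat with
  | some v =>
    if v ≠ "" ∧ d.contains ((PySem.Dict.mk stat).get? "name") = false then
      d.insert ((PySem.Dict.mk stat).get? "name") v
    else d
  | none => d

-- B's lookup loop over names
def pvLookupB (idx : PySem.Dict (Option String) String) (default : String) : List String → String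
  | [] => default
  | n :: rest =>
    match idx.get? (some n) with
    | some v => v
    | none => pvLookupB idx default rest

def get_stat_value_py_alt (stats_list : List (List (String × String))) (names : List String) (default : String) : String :=
  pvLookupB (stats_list.foldl pvStepB PySem.Dict.empty) default names

-- ===== PRECONDITION & SPEC =====
def Spec_get_stat_value_py (stats_list : List (List (String × String))) (names : List String) (default : String) (out : String) : Prop := out = get_stat_value_py_alt stats_list names default
instance (stats_list : List (List (String × String))) (names : List String) (default : String) (out : String) : Decidable (Spec_get_stat_value_py stats_list names default out) := by unfold Spec_get_stat_value_py; infer_instance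

-- ===== CLAIM (what is proved, stated in full; the proofs are below) =====
def Claim_equal_get_stat_value_py : Prop := ∀ (stats_list : List (List (String × String))) (names : List String) (default : String), Dom_get_stat_value_py stats_list names default → Spec_get_stat_value_py stats_list names default (get_stat_value_py stats_list names default)

-- ===== LEMMAS AND PROOFS =====

-- A's inner loop at one stat, rephrased through B's value selection pvStatVal
theorem pvInnerA_cons (n : String) (stat : List (String × String)) (rest : List (List (String × String))) :
    pvInnerA n (stat :: rest) =
      if (PySem.Dict.mk stat).get? "name" = some n then
        (match pvStatVal stat with
         | some v => if v ≠ "" then some v else pvInnerA n rest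
         | none => pvInnerA n rest)
      else pvInnerA n rest := by
  simp only [pvInnerA, pvStatVal]
  cases hdv : (PySem.Dict.mk stat).get? "displayValue" with
  | none => simp
  | some v =>
    by_cases hv : v = ""
    · subst hv; simp
    · simp [hv]

-- invariant of B's index-building fold: lookup in the built index is A's inner scan, behind any prior bindings
theorem get?_foldl_pvStepB (stats : List (List (String × String))) (d : PySem.Dict (Option String) String) (n : String) :
    (stats.foldl pvStepB d).get? (some n) =
      (match d.get? (some n) with
       | some v => some v
       | none => pvInnerA n stats) := by
  induction stats generalizing d with
  | nil => cases h : d.get? (some n) <;> simp [pvInnerA, h]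
  | cons stat rest ih =>
    rw [List.foldl_cons, ih, pvInnerA_cons]
    by_cases hk : (PySem.Dict.mk stat).get? "name" = some n
    · cases hsv : pvStatVal stat with
      | none => simp [pvStepB, hsv, hk]
      | some v =>
        by_cases hv : v = ""
        · subst hv; simp [pvStepB, hsv, hk]
        · by_cases hc : d.contains (some n) = false
          · have hnone : d.get? (some n) = none := by
              have := PySem.Dict.contains_eq_isSome_get? (d := d) (k := (some n : Option String))
              rw [hc] at this
              cases h : d.get? (some n) with
              | none => rfl
              | some w => rw [h] at this; simp at this
            simp [pvStepB, hsv, hv, hk, hc, PySem.Dict.get?_insert_self, hnone]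
          · have hct : d.contains (some n) = true := by
              cases h : d.contains (some n) with
              | false => exact absurd h hc
              | true => rfl
            have hsome : (d.get? (some n)).isSome := by
              rw [← PySem.Dict.contains_eq_isSome_get?, hct]
            cases h : d.get? (some n) with
            | none => rw [h] at hsome; simp at hsome
            | some w => simp [pvStepB, hsv, hv, hk, hct, h]
    · cases hsv : pvStatVal stat with
      | none => simp [pvStepB, hsv, hk]
      | some v =>
        by_cases hv : v = ""
        · subst hv; simp [pvStepB, hsv, hk]
        · by_cases hc : d.contains ((PySem.Dict.mk stat).get? "name") = false
          · have hne : (some n : Option String) ≠ (PySem.Dict.mk stat).get? "name" := fun h => hk h.symm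
            simp [pvStepB, hsv, hv, hc, PySem.Dict.get?_insert_of_ne _ _ hne, hk]
          · simp [pvStepB, hsv, hv, hc, hk]

theorem pvOuterA_eq_pvLookupB (stats : List (List (String × String))) (default : String) (names : List String) :
    pvOuterA stats default names = pvLookupB (stats.foldl pvStepB PySem.Dict.empty) default names := by
  induction names with
  | nil => rfl
  | cons n rest ih =>
    simp only [pvOuterA, pvLookupB, ih, get?_foldl_pvStepB, PySem.Dict.get?_empty]

-- ===== VERDICT (by name: the statement is the Claim_ definition above) =====
theorem get_stat_value_py_spec : Claim_equal_get_stat_value_py := by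
  intro stats names default _
  unfold Spec_get_stat_value_py get_stat_value_py get_stat_value_py_alt
  exact pvOuterA_eq_pvLookupB stats default names
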